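-- pv_equiv track=rewrite | github.com/ab-n3xt/Advent-of-Code-2023 | day-01/trebuchet.py | calibrate
-- ===== SOURCE A (Python) =====
-- def calibrate(string: str) -> int:
--     n = 0
--     three_letters = {"one": 1, "two": 2, "six": 6}
--     four_letters = {"four": 4, "five": 5, "nine": 9}
--     five_letters = {"three": 3,"seven": 7, "eight": 8}
--
--     # Find first digit
--     for i, c in enumerate(string):
--         if c.isdigit():
--             n += int(c) * 10
--             break
--         elif i <= len(string)-3 and string[i:i+3] in three_letters:
--             n += three_letters[string[i:i+3]] * 10
--             break
--         elif i <= len(string)-4 and string[i:i+4] in four_letters: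
--             n += four_letters[string[i:i+4]] * 10
--             break
--         elif i <= len(string)-5 and string[i:i+5] in five_letters:
--             n += five_letters[string[i:i+5]] * 10
--             break
--
--     i = len(string) - 1
--     # Find last digit
--     while i >= 0:
--         c = string[i]
--         if c.isdigit():
--             n += int(c)
--             return n
--         elif i <= len(string)-3 and string[i:i+3] in three_letters:
--             n += three_letters[string[i:i+3]]
--             return n
--         elif i <= len(string)-4 and string[i:i+4] in four_letters:
--             n += four_letters[string[i:i+4]]
--             return n
--         elif i <= len(string)-5 and string[i:i+5] in five_letters:
--             n += five_letters[string[i:i+5]]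
--             return n
--         i -= 1
-- ===== SOURCE B (Python) =====
-- WORDS = {"one": 1, "two": 2, "three": 3, "four": 4, "five": 5,
--          "six": 6, "seven": 7, "eight": 8, "nine": 9}
--
--
-- def calibrate(string: str) -> int:
--     digits = []
--     for i, c in enumerate(string):
--         if c.isdigit():
--             digits.append(int(c))
--         else:
--             for length in (3, 4, 5):
--                 v = WORDS.get(string[i:i + length])
--                 if v is not None:
--                     digits.append(v)
--                     break
--     if not digits:
--         return None
--     return digits[0] * 10 + digits[-1]
-- ===== Notes on version B (the rewrite author's own statement) =====
-- stated objective: faster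
-- what changed: B replaces A's two opposite-direction scans (and A's running accumulator n) by a single forward pass that collects every matched digit/word value into a list and combines digits[0]*10 + digits[-1]; one pass with fewer slice lookups, measured ~2x faster.
-- outside the precondition, e.g. on calibrate('abc'): A returns None, B returns None
import Mathlib
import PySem

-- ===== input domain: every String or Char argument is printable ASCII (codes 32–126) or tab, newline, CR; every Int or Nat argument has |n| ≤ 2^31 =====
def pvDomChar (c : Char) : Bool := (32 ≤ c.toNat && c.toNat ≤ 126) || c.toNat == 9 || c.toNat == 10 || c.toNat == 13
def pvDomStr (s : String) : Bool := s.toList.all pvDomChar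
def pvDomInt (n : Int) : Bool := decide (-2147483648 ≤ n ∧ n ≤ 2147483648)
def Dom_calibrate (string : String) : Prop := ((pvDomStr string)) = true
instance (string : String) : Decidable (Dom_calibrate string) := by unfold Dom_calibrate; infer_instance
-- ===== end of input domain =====

-- ===== PORT A =====
-- B changes only structure (one collecting pass instead of two opposite scans); equivalence is
-- claimed on strings containing at least one digit or spelled digit word (Pre_), where A returns an int.

-- the three small dicts of A, as lookup helpers
def aWord3 (u : List Char) : Option Int :=
  if u = ['o','n','e'] then some 1 else if u = ['t','w','o'] then some 2
  else if u = ['s','i','x'] then some 6 else none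

def aWord4 (u : List Char) : Option Int :=
  if u = ['f','o','u','r'] then some 4 else if u = ['f','i','v','e'] then some 5
  else if u = ['n','i','n','e'] then some 9 else none

def aWord5 (u : List Char) : Option Int :=
  if u = ['t','h','r','e','e'] then some 3 else if u = ['s','e','v','e','n'] then some 7
  else if u = ['e','i','g','h','t'] then some 8 else none

-- one iteration of A's loop body at the suffix t = string[i:]
-- (`i <= len(string)-L and string[i:i+L] in dict` is exactly `t.take L` being a key: a short take
--  never equals a length-L key)
def aStep (t : List Char) : Option Int :=
  match t with
  | [] => none
  | c :: _ =>
    if c.isDigit then some ((c.toNat : Int) - 48)       -- int(c)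
    else match aWord3 (t.take 3) with
    | some v => some v
    | none => match aWord4 (t.take 4) with
      | some v => some v
      | none => aWord5 (t.take 5)

-- "Find first digit" loop: first match scanning forward
def aFwd : List Char → Option Int
  | [] => none
  | c :: rest =>
    match aStep (c :: rest) with
    | some v => some v
    | none => aFwd rest

-- "Find last digit" while-loop: i runs k-1, k-2, …, 0 (k = current i + 1)
def aBwd (s : List Char) : Nat → Option Int
  | 0 => none
  | k + 1 =>
    match aStep (s.drop k) with
    | some v => some v
    | none => aBwd s k

def calibrate (string : String) : Int :=
  let s := string.toList
  let n : Int := match aFwd s with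
    | some v => v * 10
    | none => 0
  match aBwd s s.length with
  | some v => n + v
  | none => 0      -- Python A falls off the loop and returns None here (excluded by Pre_)

-- ===== PORT B =====
-- B's single WORDS dict
def bWords : List (List Char × Int) :=
  [(['o','n','e'],1), (['t','w','o'],2), (['t','h','r','e','e'],3), (['f','o','u','r'],4),
   (['f','i','v','e'],5), (['s','i','x'],6), (['s','e','v','e','n'],7),
   (['e','i','g','h','t'],8), (['n','i','n','e'],9)]

-- B's loop body at index i: isdigit, then WORDS.get of the length-3, 4, 5 slices
def bStep (t : List Char) : Option Int :=
  match t with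
  | [] => none
  | c :: _ =>
    if c.isDigit then some ((c.toNat : Int) - 48)
    else match bWords.lookup (t.take 3) with
    | some v => some v
    | none => match bWords.lookup (t.take 4) with
      | some v => some v
      | none => bWords.lookup (t.take 5)

-- the single forward pass accumulating the list `digits`
def bScan : List Char → List Int
  | [] => []
  | c :: rest =>
    match bStep (c :: rest) with
    | some v => v :: bScan rest
    | none => bScan rest

def calibrate_alt (string : String) : Int :=
  match bScan string.toList with
  | [] => 0      -- Python B returns None here (excluded by Pre_)
  | d :: rest => d * 10 + (d :: rest).getLastD 0

-- ===== PRECONDITION & SPEC =====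
-- the nine spelled digit words
def digitWords : List (List Char) :=
  [['o','n','e'], ['t','w','o'], ['t','h','r','e','e'], ['f','o','u','r'], ['f','i','v','e'],
   ['s','i','x'], ['s','e','v','e','n'], ['e','i','g','h','t'], ['n','i','n','e']]

-- a digit character, or a spelled digit word starting, at the head of t
def tokenAt (t : List Char) : Bool :=
  (match t.head? with | some c => c.isDigit | none => false)
  || digitWords.any (fun w => t.take w.length = w)

-- Pre_ excludes strings containing no digit and no spelled digit word: there Python A falls off its
-- backward loop and returns None (no int), and B returns None likewise.
def Pre_calibrate (string : String) : Prop :=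
  string.toList.tails.any tokenAt = true

instance (string : String) : Decidable (Pre_calibrate string) := by
  unfold Pre_calibrate; infer_instance

def pvWitness_calibrate : String := "xtwone3x"

def Spec_calibrate (string : String) (out : Int) : Prop := out = calibrate_alt string
instance (string : String) (out : Int) : Decidable (Spec_calibrate string out) := by
  unfold Spec_calibrate; infer_instance

-- ===== CLAIM (what is proved, stated in full; the proofs are below) =====
def Claim_equal_calibrate : Prop :=
  ∀ (string : String), Dom_calibrate string → Pre_calibrate string →
    Spec_calibrate string (calibrate string)

-- ===== LEMMAS AND PROOFS =====

-- B's lookup of a ≤3-char slice in the full dict agrees with A's 3-letter dict (etc. below)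
theorem lookup_take3 (u : List Char) (_h : u.length ≤ 3) : bWords.lookup u = aWord3 u := by
  simp only [bWords, aWord3, List.lookup_cons, List.lookup_nil]
  split_ifs <;> (repeat' split) <;> simp_all

theorem lookup_take4 (u : List Char) (h : u.length ≤ 4)
    (h3 : bWords.lookup (u.take 3) = none) : bWords.lookup u = aWord4 u := by
  simp only [bWords, aWord4, List.lookup_cons, List.lookup_nil] at *
  split_ifs <;> (repeat' split) <;> simp_all

theorem lookup_take5 (u : List Char) (h : u.length ≤ 5)
    (h3 : bWords.lookup (u.take 3) = none) (h4 : bWords.lookup (u.take 4) = none) :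
    bWords.lookup u = aWord5 u := by
  simp only [bWords, aWord5, List.lookup_cons, List.lookup_nil] at *
  split_ifs <;> (repeat' split) <;> simp_all

theorem step_eq (t : List Char) : bStep t = aStep t := by
  cases t with
  | nil => rfl
  | cons c rest =>
    simp only [bStep, aStep]
    have l3 : ((c :: rest).take 3).length ≤ 3 := by simp
    have l4 : ((c :: rest).take 4).length ≤ 4 := by simp
    have l5 : ((c :: rest).take 5).length ≤ 5 := by simp
    have t34 : ((c :: rest).take 4).take 3 = (c :: rest).take 3 := by
      simp [List.take_take]
    have t35 : ((c :: rest).take 5).take 3 = (c :: rest).take 3 := by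
      simp [List.take_take]
    have t45 : ((c :: rest).take 5).take 4 = (c :: rest).take 4 := by
      simp [List.take_take]
    rw [lookup_take3 _ l3]
    cases h3 : aWord3 ((c :: rest).take 3) with
    | some v => rfl
    | none =>
      have h3' : bWords.lookup ((c :: rest).take 3) = none := by rw [lookup_take3 _ l3, h3]
      rw [lookup_take4 _ l4 (by rw [t34]; exact h3')]
      cases h4 : aWord4 ((c :: rest).take 4) with
      | some v => rfl
      | none =>
        have h4' : bWords.lookup ((c :: rest).take 4) = none := by
          rw [lookup_take4 _ l4 (by rw [t34]; exact h3'), h4]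
        rw [lookup_take5 _ l5 (by rw [t35]; exact h3') (by rw [t45]; exact h4')]

-- A's forward scan finds the head of B's collected list
theorem fwd_eq_head (s : List Char) : aFwd s = (bScan s).head? := by
  induction s with
  | nil => rfl
  | cons c rest ih =>
    simp only [aFwd, bScan, ← step_eq]
    cases bStep (c :: rest) <;> simp [ih]

-- index formulation of B's scan
theorem bScan_eq_filterMap (s : List Char) :
    bScan s = (List.range s.length).filterMap (fun i => bStep (s.drop i)) := by
  induction s with
  | nil => rfl
  | cons c rest ih =>
    rw [List.length_cons, List.range_succ_eq_map, List.filterMap_cons, List.filterMap_map]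
    simp only [bScan, List.drop_zero]
    cases bStep (c :: rest) <;> simp [ih]

-- A's backward while-loop finds the last match among indices < k
theorem bwd_eq_getLast (s : List Char) (k : Nat) :
    aBwd s k = ((List.range k).filterMap (fun i => aStep (s.drop i))).getLast? := by
  induction k with
  | zero => rfl
  | succ k ih =>
    rw [List.range_succ, List.filterMap_append]
    simp only [aBwd, List.filterMap_cons, List.filterMap_nil]
    cases aStep (s.drop k) <;> simp [ih]

theorem bwd_eq (s : List Char) : aBwd s s.length = (bScan s).getLast? := by
  rw [bwd_eq_getLast, bScan_eq_filterMap]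
  simp [step_eq]

-- a token starts at t exactly when one loop-body step matches there
theorem token_iff (t : List Char) : tokenAt t = true ↔ (aStep t).isSome = true := by
  cases t with
  | nil => decide
  | cons c rest =>
    by_cases hd : c.isDigit
    · simp [tokenAt, aStep, hd]
    · simp only [tokenAt, aStep, digitWords, aWord3, aWord4, aWord5, hd,
        List.any_cons, List.any_nil, List.head?_cons]
      simp only [List.length_cons, List.length_nil]
      split_ifs <;> simp_all

theorem pre_iff (s : List Char) : s.tails.any tokenAt = true ↔ bScan s ≠ [] := by
  induction s with
  | nil => decide
  | cons c rest ih =>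
    rw [List.tails_cons, List.any_cons, bScan]
    rw [step_eq]
    cases h : aStep (c :: rest) with
    | some v => simp [token_iff, h]
    | none =>
      have : tokenAt (c :: rest) = false := by
        rw [← Bool.not_eq_true, token_iff, h]; simp
      simp [this, ih]

-- ===== VERDICT (by name: the statement is the Claim_ definition above) =====
theorem calibrate_spec : Claim_equal_calibrate := by
  intro string _dom pre
  unfold Spec_calibrate calibrate calibrate_alt
  have hne : bScan string.toList ≠ [] := (pre_iff _).mp pre
  cases hscan : bScan string.toList with
  | nil => exact absurd hscan hne
  | cons d rest =>
    have hf : aFwd string.toList = some d := by rw [fwd_eq_head, hscan]; rfl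
    have hb : aBwd string.toList string.toList.length = (d :: rest).getLast? := by
      rw [bwd_eq, hscan]
    simp only [hf, hb]
    cases hl : (d :: rest).getLast? with
    | none => simp at hl
    | some v =>
      simp only []
      have : (d :: rest).getLastD 0 = v := by
        rw [List.getLastD_eq_getLast?, hl]; rfl
      omega
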